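-- pv_equiv track=rewrite | github.com/EDAII/Lista4_IgorAraujo_Daniel | botEda/searchMethods.py | sentry_sequence_search
-- ===== SOURCE A (Python) =====
-- def fill_vector_order(total_numbers):
--     vector = list(range(0,total_numbers + 1))
--     return vector
--
-- def sentry_sequence_search(total_numbers,valor_a_ser_encontrado):
--     vector = fill_vector_order(total_numbers)
--     i = 0
--     vector.append(valor_a_ser_encontrado)
--     while vector[i] != valor_a_ser_encontrado:
--         i += 1
--     if i == len(vector) - 1:
--         return -1
--     return  i
-- ===== SOURCE B (Python) =====
-- def sentry_sequence_search(total_numbers, valor_a_ser_encontrado):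
--     # The searched vector is exactly [0, 1, ..., total_numbers], so the index of
--     # a present value is the value itself; otherwise the sentinel is hit -> -1.
--     if 0 <= valor_a_ser_encontrado <= total_numbers:
--         return valor_a_ser_encontrado
--     return -1
-- ===== Notes on version B (the rewrite author's own statement) =====
-- stated objective: faster
-- what changed: Replaces building the identity vector and the sentinel linear scan by the closed form: return the value itself if 0 <= value <= total_numbers, else -1.
import Mathlib
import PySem

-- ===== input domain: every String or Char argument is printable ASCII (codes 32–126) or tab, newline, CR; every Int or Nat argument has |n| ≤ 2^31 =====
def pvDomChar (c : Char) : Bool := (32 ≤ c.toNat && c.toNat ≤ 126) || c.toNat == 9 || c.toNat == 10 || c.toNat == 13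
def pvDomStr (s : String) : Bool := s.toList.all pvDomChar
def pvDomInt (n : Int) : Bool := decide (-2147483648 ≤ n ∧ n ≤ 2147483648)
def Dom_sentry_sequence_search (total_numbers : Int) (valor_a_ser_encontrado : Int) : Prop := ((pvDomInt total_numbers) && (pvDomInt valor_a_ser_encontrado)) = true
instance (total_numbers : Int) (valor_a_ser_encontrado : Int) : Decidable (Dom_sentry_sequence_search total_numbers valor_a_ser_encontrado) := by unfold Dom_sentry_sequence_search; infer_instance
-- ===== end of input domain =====

-- B replaces the identity-vector build and sentinel linear scan with the O(1) closed form (measurably faster).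
-- ===== PORT A =====
-- while vector[i] != valor: i += 1  — structural recursion over the vector, carrying the index i.
def pvLoopA : List Int → Int → Nat → Nat
  | [], _, i => i
  | h :: t, x, i => if h = x then i else pvLoopA t x (i + 1)

def fill_vector_order (total_numbers : Int) : List Int :=
  PySem.List.pyRange 0 (total_numbers + 1) 1

-- the post-loop check 'if i == len(vector) - 1: return -1; return i'
def pvFinish (vector : List Int) (i : Nat) : Int :=
  if (i : Int) = (vector.length : Int) - 1 then -1 else (i : Int)

def sentry_sequence_search (total_numbers : Int) (valor_a_ser_encontrado : Int) : Int :=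
  pvFinish (fill_vector_order total_numbers ++ [valor_a_ser_encontrado])
    (pvLoopA (fill_vector_order total_numbers ++ [valor_a_ser_encontrado]) valor_a_ser_encontrado 0)

-- ===== PORT B =====
def sentry_sequence_search_alt (total_numbers : Int) (valor_a_ser_encontrado : Int) : Int :=
  if 0 ≤ valor_a_ser_encontrado ∧ valor_a_ser_encontrado ≤ total_numbers then
    valor_a_ser_encontrado
  else -1

-- ===== PRECONDITION & SPEC =====
def Spec_sentry_sequence_search (total_numbers : Int) (valor_a_ser_encontrado : Int) (out : Int) : Prop := out = sentry_sequence_search_alt total_numbers valor_a_ser_encontrado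
instance (total_numbers : Int) (valor_a_ser_encontrado : Int) (out : Int) : Decidable (Spec_sentry_sequence_search total_numbers valor_a_ser_encontrado out) := by unfold Spec_sentry_sequence_search; infer_instance

-- ===== CLAIM (what is proved, stated in full; the proofs are below) =====
def Claim_equal_sentry_sequence_search : Prop := ∀ (total_numbers : Int) (valor_a_ser_encontrado : Int), Dom_sentry_sequence_search total_numbers valor_a_ser_encontrado → Spec_sentry_sequence_search total_numbers valor_a_ser_encontrado (sentry_sequence_search total_numbers valor_a_ser_encontrado)

-- ===== LEMMAS AND PROOFS =====
-- pvLoopA over l ++ [x] with x ∉ l passes the whole of l and stops at the sentinel.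
theorem pvLoopA_not_mem (l : List Int) (x : Int) (i : Nat) (h : x ∉ l) :
    pvLoopA (l ++ [x]) x i = i + l.length := by
  induction l generalizing i with
  | nil => simp [pvLoopA]
  | cons a t ih =>
    simp only [List.mem_cons, not_or] at h
    simp only [List.cons_append, pvLoopA, if_neg (Ne.symm h.1)]
    rw [ih _ h.2]
    simp
    omega

-- pvLoopA stops at the first occurrence of x.
theorem pvLoopA_split (l r : List Int) (x : Int) (i : Nat) (h : x ∉ l) :
    pvLoopA (l ++ x :: r) x i = i + l.length := by
  induction l generalizing i with
  | nil => simp [pvLoopA]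
  | cons a t ih =>
    simp only [List.mem_cons, not_or] at h
    simp only [List.cons_append, pvLoopA, if_neg (Ne.symm h.1)]
    rw [ih _ h.2]
    simp
    omega

-- ===== VERDICT (by name: the statement is the Claim_ definition above) =====
theorem sentry_sequence_search_spec : Claim_equal_sentry_sequence_search := by
  intro t v _
  unfold Spec_sentry_sequence_search sentry_sequence_search sentry_sequence_search_alt
      fill_vector_order pvFinish
  by_cases hv : 0 ≤ v ∧ v ≤ t
  · -- v occurs in the vector, first at index v.toNat
    have hsplit : PySem.List.pyRange 0 (t + 1) 1
        = PySem.List.pyRange 0 v 1 ++ v :: PySem.List.pyRange (v + 1) (t + 1) 1 := by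
      rw [PySem.List.pyRange_one_append 0 v (t + 1) hv.1 (by omega),
        PySem.List.pyRange_one_cons (by omega : v < t + 1)]
    rw [hsplit, List.append_assoc, List.cons_append]
    rw [pvLoopA_split _ _ _ _ (by rw [PySem.List.mem_pyRange_one]; omega)]
    have hlen : (PySem.List.pyRange 0 v 1).length = v.toNat := by
      rw [PySem.List.length_pyRange_one]; omega
    have hlen2 : (PySem.List.pyRange (v + 1) (t + 1) 1).length = (t - v).toNat := by
      rw [PySem.List.length_pyRange_one]; omega
    simp only [List.length_append, List.length_cons, hlen, hlen2, Nat.zero_add]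
    rw [if_neg (by push_cast; omega), if_pos hv]
    omega
  · -- v is nowhere in the range: the loop runs into the sentinel
    rw [pvLoopA_not_mem _ _ _ (by rw [PySem.List.mem_pyRange_one]; omega)]
    have hlen : (PySem.List.pyRange 0 (t + 1) 1).length = (t + 1).toNat := by
      rw [PySem.List.length_pyRange_one]; omega
    simp only [List.length_append, List.length_singleton, hlen, Nat.zero_add]
    rw [if_pos (by push_cast; omega), if_neg hv]
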